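-- pv_equiv track=rewrite | github.com/Yutao-Zhou/Leetcode | 820. Short Encoding of Words.py | minimumLengthEncoding
-- ===== SOURCE A (Python) =====
-- from typing import List
--
-- class TrieNode:
--     def __init__(self, char=None):
--         self.char = char
--         self.child = {}
--
-- def minimumLengthEncoding(words: List[str]) -> int:
--     #### Trie ####
--     ans = 0
--     root = TrieNode()
--     for word in words:
--         last = root
--         for i in range(len(word) - 1, -1, -1):
--             if word[i] not in last.child:
--                 last.child[word[i]] = TrieNode(word[i])
--             last = last.child[word[i]]
--     stack = []
--     for value in root.child.values():
--         stack.append((value, 1))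
--     while stack:
--         node, length = stack.pop()
--         if node.child:
--             for value in node.child.values():
--                 stack.append((value, length + 1))
--         else:
--             ans += length + 1
--     return ans
-- ===== SOURCE B (Python) =====
-- def minimumLengthEncoding(words):
--     good = {w for w in words if w}
--     for word in words:
--         for k in range(1, len(word)):
--             good.discard(word[k:])
--     return sum(len(w) + 1 for w in good)
-- ===== Notes on version B (the rewrite author's own statement) =====
-- stated objective: simpler
-- what changed: Replaces the reversed-word trie plus explicit DFS stack summing leaf depths by a set of distinct non-empty words from which every proper suffix of any word is discarded, then sums len(w)+1 over the survivors.
import Mathlib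
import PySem

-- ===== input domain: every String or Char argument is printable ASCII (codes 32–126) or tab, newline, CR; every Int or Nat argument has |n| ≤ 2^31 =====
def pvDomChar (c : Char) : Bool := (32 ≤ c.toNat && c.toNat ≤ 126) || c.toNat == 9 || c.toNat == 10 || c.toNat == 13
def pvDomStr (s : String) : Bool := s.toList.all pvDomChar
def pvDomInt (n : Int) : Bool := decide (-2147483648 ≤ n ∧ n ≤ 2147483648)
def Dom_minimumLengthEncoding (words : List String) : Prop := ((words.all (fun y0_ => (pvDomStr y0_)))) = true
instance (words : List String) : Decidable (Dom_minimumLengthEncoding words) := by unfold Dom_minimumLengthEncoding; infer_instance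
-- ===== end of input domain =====

-- B replaces A's reversed-word trie + explicit DFS stack by a set of distinct non-empty
-- words from which every proper suffix of any word is discarded (objective: simpler).

-- ===== PORT A =====
-- A TrieNode is modelled by its child dict (the unused `char` field is dropped): a node IS
-- its association list of (Char, subtree), kept in insertion order like a Python dict.
inductive PvTrie where
  | nil : PvTrie                                -- empty child dict
  | cons : Char → PvTrie → PvTrie → PvTrie      -- one (char, child) entry, rest of the dict
deriving DecidableEq, Repr

-- `word[i] in last.child` / `last.child[word[i]]`: first (= only) matching key
def pvChGet? : PvTrie → Char → Option PvTrie
  | .nil, _ => none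
  | .cons c t r, x => if x = c then some t else pvChGet? r x

-- `last.child[word[i]] = TrieNode(word[i])` / overwrite in place (dict assignment)
def pvChSet : PvTrie → Char → PvTrie → PvTrie
  | .nil, x, v => .cons x v .nil
  | .cons c t r, x, v => if x = c then .cons c v r else .cons c t (pvChSet r x v)

-- the inner `for i in range(len(word)-1, -1, -1)` walk: every index is in range, so it
-- visits exactly the characters of word.toList.reverse; ported as recursion over that list
def pvInsertRev : PvTrie → List Char → PvTrie
  | t, [] => t
  | t, c :: rest =>
      let child := match pvChGet? t c with
        | some u => u
        | none => PvTrie.nil            -- `TrieNode(word[i])` freshly created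
      pvChSet t c (pvInsertRev child rest)

-- `node.child.values()` in dict order
def pvChList : PvTrie → List PvTrie
  | .nil => []
  | .cons _ t r => t :: pvChList r

def pvSize : PvTrie → Nat
  | .nil => 0
  | .cons _ t r => 1 + pvSize t + pvSize r

theorem pvSize_chList (t : PvTrie) : ((pvChList t).map (fun v => pvSize v + 1)).sum = pvSize t := by
  induction t with
  | nil => simp [pvChList, pvSize]
  | cons c u r ihu ihr => simp [pvChList, pvSize, ihr]; omega

-- the `while stack:` loop; the Lean list head is the Python stack's top (last element), so
-- `stack.append` of the children in order = consing their reversal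
def pvDfs : List (PvTrie × Int) → Int → Int
  | [], ans => ans
  | (.nil, len) :: rest, ans => pvDfs rest (ans + len + 1)          -- leaf: ans += length+1
  | (t, len) :: rest, ans =>
      pvDfs (((pvChList t).map (fun v => (v, len + 1))).reverse ++ rest) ans
termination_by st _ => (st.map (fun p => pvSize p.1 + 1)).sum
decreasing_by
  · simp
  · have h := pvSize_chList t
    simp only [List.map_append, List.map_reverse, List.map_map, List.sum_append,
      List.sum_reverse, List.map_cons, List.sum_cons, Function.comp_def]
    simp at h ⊢
    omega

def minimumLengthEncoding (words : List String) : Int :=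
  let root := words.foldl (fun r w => pvInsertRev r w.toList.reverse) PvTrie.nil
  pvDfs (((pvChList root).map (fun v => (v, (1 : Int)))).reverse) 0

-- ===== PORT B =====
def minimumLengthEncoding_alt (words : List String) : Int :=
  -- good = {w for w in words if w}
  let good : PySem.Set (List Char) :=
    PySem.Set.ofList ((words.filter (fun w => w.toList ≠ [])).map String.toList)
  -- for word in words: for k in range(1, len(word)): good.discard(word[k:])
  let good := words.foldl (fun g word =>
      (PySem.List.pyRange 1 (word.toList.length : Int) 1).foldl
        (fun g k => PySem.Set.discard g (PySem.List.slice word.toList (some k) none)) g) good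
  -- sum(len(w) + 1 for w in good)  (order-independent consumption of the set)
  (good.map (fun w => (w.length : Int) + 1)).sum

-- ===== PRECONDITION & SPEC =====
def Spec_minimumLengthEncoding (words : List String) (out : Int) : Prop := out = minimumLengthEncoding_alt words
instance (words : List String) (out : Int) : Decidable (Spec_minimumLengthEncoding words out) := by unfold Spec_minimumLengthEncoding; infer_instance

-- ===== CLAIM (what is proved, stated in full; the proofs are below) =====
def Claim_equal_minimumLengthEncoding : Prop := ∀ (words : List String), Dom_minimumLengthEncoding words → Spec_minimumLengthEncoding words (minimumLengthEncoding words)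

-- ===== LEMMAS AND PROOFS =====

-- keys of a child dict
def pvKeys : PvTrie → List Char
  | .nil => []
  | .cons c _ r => c :: pvKeys r

-- well-formed: keys distinct at every level (invariant of dict insertion)
def pvWf : PvTrie → Bool
  | .nil => true
  | .cons c t r => !(pvKeys r).contains c && pvWf t && pvWf r

-- all nonempty root paths of the trie
def pvPaths : PvTrie → List (List Char)
  | .nil => []
  | .cons c t r => (([] : List Char) :: pvPaths t).map (c :: ·) ++ pvPaths r

-- paths to leaves (nodes with empty child dict)
def pvLpN (t : PvTrie) : List (List Char) :=
  match t with
  | .nil => [[]]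
  | u => pvLp u
where pvLp : PvTrie → List (List Char)
  | .nil => []
  | .cons c t r => (pvLpN t).map (c :: ·) ++ pvLp r

def pvG (t : PvTrie) (d : Int) : Int := ((pvLpN t).map (fun p => d + (p.length : Int) + 1)).sum

theorem pv_sum_lp (t : PvTrie) (d : Int) :
    ((pvLpN.pvLp t).map (fun p => d + (p.length : Int) + 1)).sum
      = ((pvChList t).map (fun v => pvG v (d + 1))).sum := by
  induction t with
  | nil => simp [pvLpN.pvLp, pvChList]
  | cons c u r ihu ihr =>
    simp only [pvLpN.pvLp, pvChList, List.map_append, List.sum_append, List.map_map,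
      List.map_cons, List.sum_cons, ihr]
    congr 1
    unfold pvG
    apply congrArg
    apply List.map_congr_left
    intro p _
    simp only [Function.comp_apply, List.length_cons]
    push_cast
    ring

theorem pv_lpN_of_ne_nil {t : PvTrie} (h : t ≠ .nil) : pvLpN t = pvLpN.pvLp t := by
  cases t with
  | nil => exact absurd rfl h
  | cons c u r => simp [pvLpN]

theorem pv_dfs_eq (st : List (PvTrie × Int)) (ans : Int) :
    pvDfs st ans = ans + (st.map (fun p => pvG p.1 p.2)).sum := by
  induction st, ans using pvDfs.induct with
  | case1 ans => simp [pvDfs]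
  | case2 len rest ans ih =>
    rw [pvDfs, ih]
    simp only [List.map_cons, List.sum_cons]
    have : pvG .nil len = len + 1 := by simp [pvG, pvLpN]
    rw [this]; ring
  | case3 t len rest ans hne ih =>
    have hn : t ≠ .nil := fun h => hne h
    have hstep : pvDfs ((t, len) :: rest) ans
        = pvDfs (((pvChList t).map (fun v => (v, len + 1))).reverse ++ rest) ans := by
      cases t with
      | nil => exact absurd rfl hn
      | cons c u r =>
        rw [pvDfs]
        exact fun h => PvTrie.noConfusion h
    rw [hstep, ih]
    simp only [List.map_cons, List.sum_cons, List.map_append, List.map_reverse,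
      List.map_map, List.sum_append, List.sum_reverse]
    have hg : pvG t len = ((pvChList t).map (fun v => pvG v (len + 1))).sum := by
      unfold pvG
      rw [pv_lpN_of_ne_nil hn]
      exact pv_sum_lp t len
    rw [hg]
    have hmap : (List.map ((fun p => pvG p.1 p.2) ∘ fun v => (v, len + 1)) (pvChList t))
        = (pvChList t).map (fun v => pvG v (len + 1)) := rfl
    rw [hmap]

theorem pv_A_char (words : List String) :
    minimumLengthEncoding words
      = ((pvLpN.pvLp (words.foldl (fun r w => pvInsertRev r w.toList.reverse) PvTrie.nil)).map
          (fun p => (p.length : Int) + 1)).sum := by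
  unfold minimumLengthEncoding
  rw [pv_dfs_eq]
  simp only [List.map_reverse, List.map_map, List.sum_reverse]
  have := pv_sum_lp (words.foldl (fun r w => pvInsertRev r w.toList.reverse) PvTrie.nil) 0
  rw [show ((0 : Int) + 1) = 1 from rfl] at this
  rw [show (List.map ((fun p => pvG p.1 p.2) ∘ fun v => (v, (1:Int)))
      (pvChList (words.foldl (fun r w => pvInsertRev r w.toList.reverse) PvTrie.nil)))
      = (pvChList (words.foldl (fun r w => pvInsertRev r w.toList.reverse) PvTrie.nil)).map
        (fun v => pvG v 1) from rfl]
  rw [← this]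
  simp

theorem pv_ne_nil_of_mem_paths {t : PvTrie} {p : List Char} (h : p ∈ pvPaths t) : p ≠ [] := by
  induction t with
  | nil => simp [pvPaths] at h
  | cons c u r ihu ihr =>
    simp only [pvPaths, List.mem_append, List.mem_map, List.mem_cons] at h
    rcases h with ⟨a, _, rfl⟩ | h
    · simp
    · exact ihr h

theorem pv_head_mem_keys {t : PvTrie} {c : Char} {q : List Char} (h : c :: q ∈ pvPaths t) :
    c ∈ pvKeys t := by
  induction t with
  | nil => simp [pvPaths] at h
  | cons c' u r ihu ihr =>
    simp only [pvPaths, List.mem_append, List.mem_map, List.mem_cons] at h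
    simp only [pvKeys, List.mem_cons]
    rcases h with ⟨a, _, heq⟩ | h
    · left; exact (List.cons.injEq _ _ _ _ ▸ heq).1.symm
    · right; exact ihr h

theorem pv_mem_keys_chSet {t : PvTrie} {c x : Char} {v : PvTrie} :
    x ∈ pvKeys (pvChSet t c v) ↔ x ∈ pvKeys t ∨ x = c := by
  induction t with
  | nil => simp [pvChSet, pvKeys]
  | cons c' u r ihu ihr =>
    by_cases hc : c = c'
    · subst hc; simp [pvChSet, pvKeys]; tauto
    · simp only [pvChSet, if_neg hc, pvKeys, List.mem_cons, ihr]; tauto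

theorem pv_wf_chGet? {t v : PvTrie} {c : Char} (hwf : pvWf t) (h : pvChGet? t c = some v) :
    pvWf v := by
  induction t with
  | nil => simp [pvChGet?] at h
  | cons c' u r ihu ihr =>
    simp only [pvWf, Bool.and_eq_true, Bool.not_eq_true'] at hwf
    simp only [pvChGet?] at h
    split at h
    · cases h; exact hwf.1.2
    · exact ihr hwf.2 h

theorem pv_wf_chSet {t v : PvTrie} {c : Char} (hwf : pvWf t) (hv : pvWf v) :
    pvWf (pvChSet t c v) := by
  induction t with
  | nil => simp [pvChSet, pvWf, pvKeys, hv]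
  | cons c' u r ihu ihr =>
    simp only [pvWf, Bool.and_eq_true, Bool.not_eq_true'] at hwf
    by_cases hc : c = c'
    · subst hc
      simp only [pvChSet]
      rw [if_pos trivial]
      simp only [pvWf, Bool.and_eq_true, Bool.not_eq_true']
      exact ⟨⟨hwf.1.1, hv⟩, hwf.2⟩
    · simp only [pvChSet, if_neg hc, pvWf, Bool.and_eq_true, Bool.not_eq_true']
      refine ⟨⟨?_, hwf.1.2⟩, ihr hwf.2⟩
      have h1 := hwf.1.1
      simp only [List.contains_eq_mem, decide_eq_false_iff_not] at h1 ⊢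
      rw [pv_mem_keys_chSet]
      rintro (h | h)
      · exact h1 h
      · exact hc h.symm

theorem pv_mem_paths_cons_iff (c' : Char) (u r : PvTrie) (c : Char) (p' : List Char) :
    c :: p' ∈ pvPaths (.cons c' u r)
      ↔ (c = c' ∧ (p' = [] ∨ p' ∈ pvPaths u)) ∨ c :: p' ∈ pvPaths r := by
  simp only [pvPaths, List.mem_append, List.mem_map, List.mem_cons, List.cons_eq_cons]
  aesop

theorem pv_not_head_mem_of_contains_false {r : PvTrie} {c : Char} {p' : List Char}
    (h : (pvKeys r).contains c = false) : c :: p' ∉ pvPaths r := by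
  intro hmem
  have := pv_head_mem_keys hmem
  simp [List.contains_eq_mem] at h
  exact h this

theorem pv_mem_paths_chSet {t v : PvTrie} {c : Char} {p : List Char} (hwf : pvWf t = true) :
    p ∈ pvPaths (pvChSet t c v)
      ↔ (∃ p', p = c :: p' ∧ (p' = [] ∨ p' ∈ pvPaths v))
        ∨ (p ∈ pvPaths t ∧ ¬ ∃ p', p = c :: p') := by
  induction t with
  | nil =>
    simp only [pvChSet, pvPaths, List.mem_append, List.mem_map, List.mem_cons]
    aesop
  | cons c' u r ihu ihr =>
    simp only [pvWf, Bool.and_eq_true, Bool.not_eq_true'] at hwf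
    by_cases hc : c = c'
    · subst hc
      have hcs : pvChSet (PvTrie.cons c u r) c v = PvTrie.cons c v r := by
        simp [pvChSet]
      rw [hcs]
      constructor
      · intro hmem
        rcases p with _ | ⟨x, p'⟩
        · exact absurd rfl (pv_ne_nil_of_mem_paths hmem)
        rw [pv_mem_paths_cons_iff] at hmem
        rcases hmem with ⟨rfl, h⟩ | h
        · exact Or.inl ⟨p', rfl, h⟩
        · have hx : x ≠ c := by
            rintro rfl
            exact pv_not_head_mem_of_contains_false hwf.1.1 h
          refine Or.inr ⟨?_, by simpa [List.cons_eq_cons] using hx⟩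
          rw [pv_mem_paths_cons_iff]
          exact Or.inr h
      · rintro (⟨p', rfl, h⟩ | ⟨hmem, hnh⟩)
        · rw [pv_mem_paths_cons_iff]
          exact Or.inl ⟨rfl, h⟩
        · rcases p with _ | ⟨x, p'⟩
          · exact absurd rfl (pv_ne_nil_of_mem_paths hmem)
          have hx : x ≠ c := fun h' => hnh ⟨p', by rw [h']⟩
          rw [pv_mem_paths_cons_iff] at hmem ⊢
          rcases hmem with ⟨rfl, _⟩ | h
          · exact absurd rfl hx
          · exact Or.inr h
    · have hcs : pvChSet (PvTrie.cons c' u r) c v = PvTrie.cons c' u (pvChSet r c v) := by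
        simp [pvChSet, hc]
      rw [hcs]
      constructor
      · intro hmem
        rcases p with _ | ⟨x, p'⟩
        · exact absurd rfl (pv_ne_nil_of_mem_paths hmem)
        rw [pv_mem_paths_cons_iff] at hmem
        rcases hmem with ⟨rfl, h⟩ | h
        · refine Or.inr ⟨?_, by simpa [List.cons_eq_cons] using (Ne.symm hc)⟩
          rw [pv_mem_paths_cons_iff]
          exact Or.inl ⟨rfl, h⟩
        · rcases (ihr hwf.2).mp h with ⟨p'', heq, h'⟩ | ⟨hmem', hnh⟩
          · exact Or.inl ⟨p'', heq, h'⟩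
          · refine Or.inr ⟨?_, hnh⟩
            rw [pv_mem_paths_cons_iff]
            exact Or.inr hmem'
      · rintro (⟨p', rfl, h⟩ | ⟨hmem, hnh⟩)
        · rw [pv_mem_paths_cons_iff]
          refine Or.inr ((ihr hwf.2).mpr (Or.inl ⟨p', rfl, h⟩))
        · rcases p with _ | ⟨x, p'⟩
          · exact absurd rfl (pv_ne_nil_of_mem_paths hmem)
          rw [pv_mem_paths_cons_iff] at hmem ⊢
          rcases hmem with ⟨rfl, h⟩ | h
          · exact Or.inl ⟨rfl, h⟩
          · exact Or.inr ((ihr hwf.2).mpr (Or.inr ⟨h, hnh⟩))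

theorem pv_cons_mem_paths {t : PvTrie} {c : Char} {p' : List Char} (hwf : pvWf t = true) :
    c :: p' ∈ pvPaths t ↔ ∃ v, pvChGet? t c = some v ∧ (p' = [] ∨ p' ∈ pvPaths v) := by
  induction t with
  | nil => simp [pvPaths, pvChGet?]
  | cons c' u r ihu ihr =>
    simp only [pvWf, Bool.and_eq_true, Bool.not_eq_true'] at hwf
    rw [pv_mem_paths_cons_iff]
    by_cases hc : c = c'
    · subst hc
      have hget : pvChGet? (PvTrie.cons c u r) c = some u := by simp [pvChGet?]
      rw [hget]
      have hr := pv_not_head_mem_of_contains_false (p' := p') hwf.1.1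
      simp [hr]
    · have hget : pvChGet? (PvTrie.cons c' u r) c = pvChGet? r c := by simp [pvChGet?, hc]
      rw [hget, ← ihr hwf.2]
      simp [hc]

theorem pv_wf_insertRev {t : PvTrie} (cs : List Char) (hwf : pvWf t = true) :
    pvWf (pvInsertRev t cs) = true := by
  induction cs generalizing t with
  | nil => simpa [pvInsertRev] using hwf
  | cons c rest ih =>
    cases hg : pvChGet? t c with
    | none =>
      have hstep : pvInsertRev t (c :: rest) = pvChSet t c (pvInsertRev .nil rest) := by
        simp [pvInsertRev, hg]
      rw [hstep]
      exact pv_wf_chSet hwf (ih rfl)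
    | some u =>
      have hstep : pvInsertRev t (c :: rest) = pvChSet t c (pvInsertRev u rest) := by
        simp [pvInsertRev, hg]
      rw [hstep]
      exact pv_wf_chSet hwf (ih (pv_wf_chGet? hwf hg))

theorem pv_mem_paths_insertRev {t : PvTrie} (cs : List Char) {p : List Char} (hwf : pvWf t = true) :
    p ∈ pvPaths (pvInsertRev t cs) ↔ p ∈ pvPaths t ∨ (p ≠ [] ∧ p <+: cs) := by
  induction cs generalizing t p with
  | nil =>
    simp only [pvInsertRev, List.prefix_nil]
    constructor
    · exact Or.inl
    · rintro (h | ⟨hne, rfl⟩)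
      · exact h
      · exact absurd rfl hne
  | cons c rest ih =>
    cases hg : pvChGet? t c with
    | none =>
      have hstep : pvInsertRev t (c :: rest) = pvChSet t c (pvInsertRev .nil rest) := by
        simp [pvInsertRev, hg]
      rw [hstep, pv_mem_paths_chSet hwf]
      constructor
      · rintro (⟨p', rfl, hp'⟩ | ⟨hmem, _⟩)
        · rcases hp' with rfl | hp'
          · exact Or.inr ⟨by simp, by simp⟩
          · rcases (ih (t := .nil) rfl).mp hp' with h | ⟨hne, hpre⟩
            · simp [pvPaths] at h
            · exact Or.inr ⟨by simp, List.cons_prefix_cons.mpr ⟨rfl, hpre⟩⟩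
        · exact Or.inl hmem
      · rintro (hmem | ⟨hne, hpre⟩)
        · by_cases hp : ∃ p', p = c :: p'
          · obtain ⟨p', rfl⟩ := hp
            rcases (pv_cons_mem_paths hwf).mp hmem with ⟨v, hv, _⟩
            rw [hg] at hv; cases hv
          · exact Or.inr ⟨hmem, hp⟩
        · rcases p with _ | ⟨x, p'⟩
          · exact absurd rfl hne
          rcases List.cons_prefix_cons.mp hpre with ⟨rfl, hpre'⟩
          refine Or.inl ⟨p', rfl, ?_⟩
          rcases p' with _ | ⟨y, p''⟩
          · exact Or.inl rfl
          · exact Or.inr ((ih (t := .nil) rfl).mpr (Or.inr ⟨by simp, hpre'⟩))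
    | some u =>
      have hwu : pvWf u = true := pv_wf_chGet? hwf hg
      have hstep : pvInsertRev t (c :: rest) = pvChSet t c (pvInsertRev u rest) := by
        simp [pvInsertRev, hg]
      rw [hstep, pv_mem_paths_chSet hwf]
      constructor
      · rintro (⟨p', rfl, hp'⟩ | ⟨hmem, _⟩)
        · rcases hp' with rfl | hp'
          · exact Or.inl ((pv_cons_mem_paths hwf).mpr ⟨u, hg, Or.inl rfl⟩)
          · rcases (ih hwu).mp hp' with h | ⟨hne, hpre⟩
            · exact Or.inl ((pv_cons_mem_paths hwf).mpr ⟨u, hg, Or.inr h⟩)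
            · exact Or.inr ⟨by simp, List.cons_prefix_cons.mpr ⟨rfl, hpre⟩⟩
        · exact Or.inl hmem
      · rintro (hmem | ⟨hne, hpre⟩)
        · by_cases hp : ∃ p', p = c :: p'
          · obtain ⟨p', rfl⟩ := hp
            rcases (pv_cons_mem_paths hwf).mp hmem with ⟨v, hv, hv'⟩
            rw [hg] at hv
            cases hv
            refine Or.inl ⟨p', rfl, ?_⟩
            rcases hv' with rfl | hv'
            · exact Or.inl rfl
            · exact Or.inr ((ih hwu).mpr (Or.inl hv'))
          · exact Or.inr ⟨hmem, hp⟩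
        · rcases p with _ | ⟨x, p'⟩
          · exact absurd rfl hne
          rcases List.cons_prefix_cons.mp hpre with ⟨rfl, hpre'⟩
          refine Or.inl ⟨p', rfl, ?_⟩
          rcases p' with _ | ⟨y, p''⟩
          · exact Or.inl rfl
          · exact Or.inr ((ih hwu).mpr (Or.inr ⟨by simp, hpre'⟩))

theorem pv_build_spec (ws : List String) (t : PvTrie) (hwf : pvWf t = true) :
    pvWf (ws.foldl (fun r w => pvInsertRev r w.toList.reverse) t) = true
    ∧ ∀ p, p ∈ pvPaths (ws.foldl (fun r w => pvInsertRev r w.toList.reverse) t)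
        ↔ p ∈ pvPaths t ∨ (p ≠ [] ∧ ∃ w ∈ ws, p <+: w.toList.reverse) := by
  induction ws generalizing t with
  | nil => exact ⟨hwf, fun p => by simp⟩
  | cons w ws ih =>
    have hwf' := pv_wf_insertRev (w.toList.reverse) hwf
    obtain ⟨h1, h2⟩ := ih _ hwf'
    refine ⟨h1, fun p => ?_⟩
    simp only [List.foldl_cons]
    rw [h2 p, pv_mem_paths_insertRev _ hwf]
    simp only [List.mem_cons]
    constructor
    · rintro ((h | ⟨hne, hpre⟩) | ⟨hne, w', hw', hpre⟩)
      · exact Or.inl h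
      · exact Or.inr ⟨hne, w, Or.inl rfl, hpre⟩
      · exact Or.inr ⟨hne, w', Or.inr hw', hpre⟩
    · rintro (h | ⟨hne, w', (rfl | hw'), hpre⟩)
      · exact Or.inl (Or.inl h)
      · exact Or.inl (Or.inr ⟨hne, hpre⟩)
      · exact Or.inr ⟨hne, w', hw', hpre⟩

theorem pv_cons_injective (c : Char) : Function.Injective (fun q : List Char => c :: q) := by
  intro a b h
  simpa using h

theorem pv_head_mem_keys_lp {t : PvTrie} {c : Char} {q : List Char}
    (h : c :: q ∈ pvLpN.pvLp t) : c ∈ pvKeys t := by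
  induction t with
  | nil => simp [pvLpN.pvLp] at h
  | cons c' u r ihu ihr =>
    simp only [pvLpN.pvLp] at h
    rcases List.mem_append.mp h with h | h
    · obtain ⟨a, _, heq⟩ := List.mem_map.mp h
      simp only [pvKeys, List.mem_cons]
      exact Or.inl (List.cons.injEq _ _ _ _ ▸ heq).1.symm
    · exact List.mem_cons_of_mem _ (ihr h)

theorem pv_nodup_lpN {t : PvTrie} (hwf : pvWf t = true) : (pvLpN t).Nodup := by
  induction t with
  | nil => simp [pvLpN]
  | cons c u r ihu ihr =>
    simp only [pvWf, Bool.and_eq_true, Bool.not_eq_true'] at hwf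
    rw [pv_lpN_of_ne_nil (by simp)]
    simp only [pvLpN.pvLp]
    refine List.Nodup.append ?_ ?_ ?_
    · exact List.Nodup.map (pv_cons_injective c) (ihu hwf.1.2)
    · have := ihr hwf.2
      cases r with
      | nil => simp [pvLpN.pvLp]
      | cons c2 u2 r2 => rwa [pv_lpN_of_ne_nil (by simp)] at this
    · intro x hx hx'
      obtain ⟨a, _, rfl⟩ := List.mem_map.mp hx
      have := pv_head_mem_keys_lp hx'
      simp [List.contains_eq_mem] at hwf
      exact hwf.1.1 this

theorem pv_nodup_lp {t : PvTrie} (hwf : pvWf t = true) : (pvLpN.pvLp t).Nodup := by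
  cases t with
  | nil => simp [pvLpN.pvLp]
  | cons c u r => rw [← pv_lpN_of_ne_nil (by simp)]; exact pv_nodup_lpN hwf

theorem pv_exists_singleton_path {t : PvTrie} (h : t ≠ .nil) : ∃ x, [x] ∈ pvPaths t := by
  cases t with
  | nil => exact absurd rfl h
  | cons c u r => exact ⟨c, by simp [pvPaths]⟩

theorem pv_lp_iff {t : PvTrie} {q : List Char} (hwf : pvWf t = true) :
    q ∈ pvLpN.pvLp t ↔ q ∈ pvPaths t ∧ ∀ x, q ++ [x] ∉ pvPaths t := by
  induction t generalizing q with
  | nil => simp [pvLpN.pvLp, pvPaths]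
  | cons c u r ihu ihr =>
    simp only [pvWf, Bool.and_eq_true, Bool.not_eq_true'] at hwf
    constructor
    · intro hq
      simp only [pvLpN.pvLp] at hq
      rcases List.mem_append.mp hq with hq | hq
      · obtain ⟨a, ha, rfl⟩ := List.mem_map.mp hq
        cases u with
        | nil =>
          simp only [pvLpN] at ha
          have ha' : a = [] := by simpa using ha
          subst ha'
          refine ⟨(pv_mem_paths_cons_iff _ _ _ _ _).mpr (Or.inl ⟨rfl, Or.inl rfl⟩), ?_⟩
          intro x hx
          rcases (pv_mem_paths_cons_iff _ _ _ _ _).mp hx with ⟨_, h0⟩ | h0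
          · rcases h0 with h0 | h0
            · simp at h0
            · simp [pvPaths] at h0
          · exact pv_not_head_mem_of_contains_false hwf.1.1 h0
        | cons c2 u2 r2 =>
          rw [pv_lpN_of_ne_nil (by simp)] at ha
          obtain ⟨hmem, hext⟩ := (ihu hwf.1.2).mp ha
          refine ⟨(pv_mem_paths_cons_iff _ _ _ _ _).mpr (Or.inl ⟨rfl, Or.inr hmem⟩), ?_⟩
          intro x hx
          rw [show (c :: a) ++ [x] = c :: (a ++ [x]) from rfl] at hx
          rcases (pv_mem_paths_cons_iff _ _ _ _ _).mp hx with ⟨_, h0⟩ | h0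
          · rcases h0 with h0 | h0
            · simp at h0
            · exact hext x h0
          · exact pv_not_head_mem_of_contains_false hwf.1.1 h0
      · obtain ⟨hmem, hext⟩ := (ihr hwf.2).mp hq
        have hqne : q ≠ [] := pv_ne_nil_of_mem_paths hmem
        obtain ⟨y, q0, rfl⟩ := List.exists_cons_of_ne_nil hqne
        have hyc : y ≠ c := by
          intro h
          subst h
          exact pv_not_head_mem_of_contains_false hwf.1.1 hmem
        refine ⟨(pv_mem_paths_cons_iff _ _ _ _ _).mpr (Or.inr hmem), ?_⟩
        intro x hx
        rw [show (y :: q0) ++ [x] = y :: (q0 ++ [x]) from rfl] at hx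
        rcases (pv_mem_paths_cons_iff _ _ _ _ _).mp hx with ⟨h0, _⟩ | h0
        · exact hyc h0
        · exact hext x h0
    · rintro ⟨hmem, hext⟩
      have hqne : q ≠ [] := pv_ne_nil_of_mem_paths hmem
      obtain ⟨y, q0, rfl⟩ := List.exists_cons_of_ne_nil hqne
      simp only [pvLpN.pvLp]
      rcases (pv_mem_paths_cons_iff _ _ _ _ _).mp hmem with ⟨rfl, h0⟩ | h0
      · refine List.mem_append.mpr (Or.inl ?_)
        cases u with
        | nil =>
          have hq0 : q0 = [] := by
            rcases h0 with h0 | h0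
            · exact h0
            · simp [pvPaths] at h0
          subst hq0
          exact List.mem_map.mpr ⟨[], by simp [pvLpN], rfl⟩
        | cons c2 u2 r2 =>
          have hq0 : q0 ∈ pvPaths (PvTrie.cons c2 u2 r2) := by
            rcases h0 with rfl | h0
            · obtain ⟨x, hx⟩ := pv_exists_singleton_path (t := PvTrie.cons c2 u2 r2) (by simp)
              exact absurd ((pv_mem_paths_cons_iff _ _ _ _ _).mpr (Or.inl ⟨rfl, Or.inr hx⟩))
                (by simpa using hext x)
            · exact h0
          have hnoext : ∀ x, q0 ++ [x] ∉ pvPaths (PvTrie.cons c2 u2 r2) := by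
            intro x hx
            exact hext x ((pv_mem_paths_cons_iff _ _ _ _ _).mpr
              (Or.inl ⟨rfl, Or.inr (by simpa using hx)⟩))
          refine List.mem_map.mpr ⟨q0, ?_, rfl⟩
          rw [pv_lpN_of_ne_nil (by simp)]
          exact (ihu hwf.1.2).mpr ⟨hq0, hnoext⟩
      · refine List.mem_append.mpr (Or.inr ?_)
        refine (ihr hwf.2).mpr ⟨h0, ?_⟩
        intro x hx
        exact hext x ((pv_mem_paths_cons_iff _ _ _ _ _).mpr
          (Or.inr (by simpa using hx)))

theorem pv_proper_prefix_ext {q l : List Char} (h : q <+: l) (hne : q ≠ l) :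
    ∃ x, q ++ [x] <+: l := by
  obtain ⟨s, rfl⟩ := h
  cases s with
  | nil => simp at hne
  | cons y s' => exact ⟨y, s', by simp⟩

-- B side: the discard loops
theorem pv_mem_foldl_discard {α : Type} [BEq α] [LawfulBEq α] (f : Int → α) (l : List Int)
    (g : PySem.Set α) (x : α) :
    (x ∈ l.foldl (fun g k => PySem.Set.discard g (f k)) g) ↔ x ∈ g ∧ ∀ k ∈ l, x ≠ f k := by
  induction l generalizing g with
  | nil => simp
  | cons k l ih =>
    simp only [List.foldl_cons, ih, PySem.Set.mem_discard, List.mem_cons]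
    constructor
    · rintro ⟨⟨hg, hne⟩, hall⟩
      exact ⟨hg, by rintro k' (rfl | hk'); exact hne; exact hall k' hk'⟩
    · rintro ⟨hg, hall⟩
      exact ⟨⟨hg, hall k (Or.inl rfl)⟩, fun k' hk' => hall k' (Or.inr hk')⟩

theorem pv_nodup_foldl_discard {α : Type} [BEq α] [LawfulBEq α] (f : Int → α) (l : List Int)
    (g : PySem.Set α) (h : g.Nodup) :
    (l.foldl (fun g k => PySem.Set.discard g (f k)) g).Nodup := by
  induction l generalizing g with
  | nil => exact h
  | cons k l ih => exact ih _ (PySem.Set.nodup_discard _ _ h)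

-- maximality in the prefix-closed path set = being a whole reversed word with no proper extension
theorem pv_maximal_iff (words : List String) (q : List Char) :
    ((q ≠ [] ∧ ∃ w ∈ words, q <+: w.toList.reverse)
      ∧ ∀ x, ¬((q ++ [x]) ≠ [] ∧ ∃ w ∈ words, q ++ [x] <+: w.toList.reverse))
    ↔ ((∃ w ∈ words, q = w.toList.reverse) ∧ q ≠ []
        ∧ ∀ w' ∈ words, q <+: w'.toList.reverse → q = w'.toList.reverse) := by
  constructor
  · rintro ⟨⟨hne, w0, hw0, hpre⟩, hext⟩
    have hmax : ∀ w' ∈ words, q <+: w'.toList.reverse → q = w'.toList.reverse := by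
      intro w' hw' hp
      by_contra hneq
      obtain ⟨x, hx⟩ := pv_proper_prefix_ext hp hneq
      exact hext x ⟨by simp, w', hw', hx⟩
    exact ⟨⟨w0, hw0, hmax w0 hw0 hpre⟩, hne, hmax⟩
  · rintro ⟨⟨w0, hw0, heq⟩, hne, hmax⟩
    refine ⟨⟨hne, w0, hw0, heq ▸ List.prefix_rfl⟩, ?_⟩
    rintro x ⟨-, w', hw', hpx⟩
    have hp : q <+: w'.toList.reverse := ((q.prefix_append [x]).trans hpx)
    have := hmax w' hw' hp
    rw [← this] at hpx
    have := hpx.length_le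
    simp at this
-- B's nested discard loop: membership and nodup
theorem pv_mem_outer (ws : List String) (g : PySem.Set (List Char)) (u : List Char) :
    u ∈ ws.foldl (fun g word =>
        (PySem.List.pyRange 1 (word.toList.length : Int) 1).foldl
          (fun g k => PySem.Set.discard g (PySem.List.slice word.toList (some k) none)) g) g
    ↔ u ∈ g ∧ ∀ w ∈ ws, ∀ k ∈ PySem.List.pyRange 1 (w.toList.length : Int) 1,
        u ≠ PySem.List.slice w.toList (some k) none := by
  induction ws generalizing g with
  | nil => simp
  | cons w ws ih =>
    simp only [List.foldl_cons, ih, pv_mem_foldl_discard, List.mem_cons]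
    constructor
    · rintro ⟨⟨hg, hw⟩, hws⟩
      refine ⟨hg, ?_⟩
      rintro w' (rfl | hw') k hk
      · exact hw k hk
      · exact hws w' hw' k hk
    · rintro ⟨hg, hall⟩
      exact ⟨⟨hg, fun k hk => hall w (Or.inl rfl) k hk⟩,
        fun w' hw' k hk => hall w' (Or.inr hw') k hk⟩
theorem pv_nodup_outer (ws : List String) (g : PySem.Set (List Char)) (h : g.Nodup) :
    (ws.foldl (fun g word =>
        (PySem.List.pyRange 1 (word.toList.length : Int) 1).foldl
          (fun g k => PySem.Set.discard g (PySem.List.slice word.toList (some k) none)) g) g).Nodup := by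
  induction ws generalizing g with
  | nil => exact h
  | cons w ws ih => exact ih _ (pv_nodup_foldl_discard _ _ _ h)
-- proper nonempty suffix ↔ some word[k:] with 1 ≤ k < len(word)
theorem pv_suffix_iff (u l : List Char) (hu : u ≠ []) :
    (∃ k : Int, (1 ≤ k ∧ k < (l.length : Int)) ∧ u = l.drop k.toNat)
    ↔ (u <:+ l ∧ u ≠ l) := by
  constructor
  · rintro ⟨k, ⟨hk1, hk2⟩, rfl⟩
    refine ⟨List.drop_suffix _ _, ?_⟩
    intro heq
    have := congrArg List.length heq
    simp [List.length_drop] at this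
    omega
  · rintro ⟨⟨p, rfl⟩, hne⟩
    refine ⟨(p.length : Int), ⟨?_, ?_⟩, ?_⟩
    · rcases p with _ | ⟨a, p'⟩
      · exact absurd rfl hne
      · simp
    · have : u.length ≠ 0 := fun h => hu (List.eq_nil_of_length_eq_zero h)
      simp only [List.length_append]
      omega
    · simp
-- membership in B's final set
theorem pv_good_mem (words : List String) (u : List Char) :
    (u ∈ words.foldl (fun g word =>
        (PySem.List.pyRange 1 (word.toList.length : Int) 1).foldl
          (fun g k => PySem.Set.discard g (PySem.List.slice word.toList (some k) none)) g)
        (PySem.Set.ofList ((words.filter (fun w => w.toList ≠ [])).map String.toList)))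
    ↔ ((∃ w ∈ words, u = w.toList) ∧ u ≠ []
        ∧ ∀ w' ∈ words, u <:+ w'.toList → u = w'.toList) := by
  rw [pv_mem_outer]
  rw [PySem.Set.mem_ofList]
  constructor
  · rintro ⟨hg, hall⟩
    obtain ⟨w0, hw0f, heq0⟩ := List.mem_map.mp hg
    have hw0 : w0 ∈ words := (List.mem_filter.mp hw0f).1
    have hune : w0.toList ≠ [] := by simpa using (List.mem_filter.mp hw0f).2
    subst heq0
    refine ⟨⟨w0, hw0, rfl⟩, hune, ?_⟩
    intro w' hw' hsuf
    by_contra hneq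
    obtain ⟨k, hk, heq⟩ := (pv_suffix_iff _ w'.toList hune).mpr ⟨hsuf, hneq⟩
    refine hall w' hw' k (PySem.List.mem_pyRange_one.mpr ⟨hk.1, hk.2⟩) ?_
    rw [PySem.List.slice_from w'.toList (by omega : (0:Int) ≤ k)]
    exact heq
  · rintro ⟨⟨w0, hw0, rfl⟩, hune, hmax⟩
    constructor
    · exact List.mem_map.mpr ⟨w0, List.mem_filter.mpr ⟨hw0, by simpa using hune⟩, rfl⟩
    · intro w hw k hk heq
      have hk' := PySem.List.mem_pyRange_one.mp hk
      rw [PySem.List.slice_from w.toList (by omega : (0:Int) ≤ k)] at heq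
      have : w0.toList <:+ w.toList ∧ w0.toList ≠ w.toList :=
        (pv_suffix_iff _ w.toList hune).mp ⟨k, ⟨hk'.1, hk'.2⟩, heq⟩
      exact this.2 (hmax w hw this.1)

-- ===== VERDICT (by name: the statement is the Claim_ definition above) =====
theorem minimumLengthEncoding_spec : Claim_equal_minimumLengthEncoding := by
  unfold Claim_equal_minimumLengthEncoding
  intro words _
  unfold Spec_minimumLengthEncoding
  set root := words.foldl (fun r w => pvInsertRev r w.toList.reverse) PvTrie.nil with hroot
  obtain ⟨hwf, hpaths⟩ := pv_build_spec words PvTrie.nil rfl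
  rw [← hroot] at hwf hpaths
  -- characterize A's leaf path list
  have hlp : ∀ q, q ∈ pvLpN.pvLp root
      ↔ ((∃ w ∈ words, q = w.toList.reverse) ∧ q ≠ []
          ∧ ∀ w' ∈ words, q <+: w'.toList.reverse → q = w'.toList.reverse) := by
    intro q
    rw [pv_lp_iff hwf, ← pv_maximal_iff words q]
    constructor
    · rintro ⟨h1, h2⟩
      rw [hpaths] at h1
      refine ⟨?_, ?_⟩
      · rcases h1 with h1 | h1
        · simp [pvPaths] at h1
        · exact h1
      · intro x hx
        exact h2 x (by rw [hpaths]; exact Or.inr hx)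
    · rintro ⟨h1, h2⟩
      refine ⟨by rw [hpaths]; exact Or.inr h1, ?_⟩
      intro x hx
      rw [hpaths] at hx
      rcases hx with hx | hx
      · simp [pvPaths] at hx
      · exact h2 x hx
  -- the two survivor lists are permutations of each other (via reversal)
  set G := words.foldl (fun g word =>
      (PySem.List.pyRange 1 (word.toList.length : Int) 1).foldl
        (fun g k => PySem.Set.discard g (PySem.List.slice word.toList (some k) none)) g)
      (PySem.Set.ofList ((words.filter (fun w => w.toList ≠ [])).map String.toList)) with hG
  have hperm : ((pvLpN.pvLp root).map List.reverse).Perm G := by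
    rw [List.perm_ext_iff_of_nodup
      (List.Nodup.map (fun a b h => by simpa using congrArg List.reverse h) (pv_nodup_lp hwf))
      (pv_nodup_outer _ _ (PySem.Set.nodup_ofList _))]
    intro u
    have h1 : u ∈ (pvLpN.pvLp root).map List.reverse ↔ u.reverse ∈ pvLpN.pvLp root := by
      constructor
      · rintro h
        obtain ⟨q, hq, rfl⟩ := List.mem_map.mp h
        simpa using hq
      · intro h
        exact List.mem_map.mpr ⟨u.reverse, h, by simp⟩
    rw [h1, hlp, ← hG, pv_good_mem]
    constructor
    · rintro ⟨⟨w, hw, heq⟩, hne, hmax⟩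
      have hequ : u = w.toList := by simpa using congrArg List.reverse heq
      refine ⟨⟨w, hw, hequ⟩, fun h => hne (by simp [h]), ?_⟩
      intro w' hw' hsuf
      have h2 := hmax w' hw' (List.reverse_prefix.mpr hsuf)
      simpa using congrArg List.reverse h2
    · rintro ⟨⟨w, hw, rfl⟩, hne, hmax⟩
      refine ⟨⟨w, hw, rfl⟩, by simpa using hne, ?_⟩
      intro w' hw' hpre
      rw [hmax w' hw' (List.reverse_prefix.mp hpre)]
  -- assemble the two sums
  rw [pv_A_char, ← hroot]
  show ((pvLpN.pvLp root).map (fun p => (p.length : Int) + 1)).sum = minimumLengthEncoding_alt words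
  have hA : ((pvLpN.pvLp root).map (fun p => (p.length : Int) + 1)).sum
      = (((pvLpN.pvLp root).map List.reverse).map (fun u => (u.length : Int) + 1)).sum := by
    rw [List.map_map]
    apply congrArg
    apply List.map_congr_left
    intro p _
    simp
  rw [hA, (hperm.map (fun u => (u.length : Int) + 1)).sum_eq]
  simp only [minimumLengthEncoding_alt, ← hG]
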